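-- pv_equiv track=rewrite | github.com/erickcunha1/pdf_to_xlsx | leitorTelefone.py | retornar_item_apos_palavra_chave
-- ===== SOURCE A (Python) =====
-- def retornar_item_apos_palavra_chave(texto, palavra_chave, distancia):
--     linhas = texto.strip().split('\n')
--
--     # Inicializar lista para armazenar os itens encontrados
--     itens_encontrados = []
--
--     # Iterar sobre as linhas do texto
--     for i, linha in enumerate(linhas):
--         # Verificar se a linha contém a palavra-chave
--         if palavra_chave in linha:
--             # Calcular o índice do item seguinte baseado na distância
--             indice_item = i + distancia
--             # Verificar se o índice está dentro dos limites
--             if 0 <= indice_item < len(linhas):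
--                 # Adicionar o item encontrado à lista de itens
--                 itens_encontrados.append(linhas[indice_item])
--
--     # Retornar a lista de itens encontrados
--     return itens_encontrados
-- ===== SOURCE B (Python) =====
-- def retornar_item_apos_palavra_chave(texto, palavra_chave, distancia):
--     linhas = texto.strip().split('\n')
--     n = len(linhas)
--     # Stage 1: boolean mask of keyword-containing lines.
--     mask = [palavra_chave in linha for linha in linhas]
--     # Stage 2: shift the mask forward by `distancia`, padding with False,
--     # so that shifted[j] says "line j is at offset distancia from a keyword line".
--     if distancia >= 0:
--         shifted = [False] * min(distancia, n) + mask[:max(n - distancia, 0)]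
--     else:
--         shifted = mask[min(-distancia, n):] + [False] * min(-distancia, n)
--     # Stage 3: select the marked lines.
--     return [linha for linha, m in zip(linhas, shifted) if m]
-- ===== Notes on version B (the rewrite author's own statement) =====
-- stated objective: alternative
-- what changed: B replaces A's single indexed scan (jump forward by distancia on each keyword hit) by three staged passes: build a boolean keyword mask, shift the whole mask by distancia with False padding via slicing, then filter the lines zipped with the shifted mask.
import Mathlib
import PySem

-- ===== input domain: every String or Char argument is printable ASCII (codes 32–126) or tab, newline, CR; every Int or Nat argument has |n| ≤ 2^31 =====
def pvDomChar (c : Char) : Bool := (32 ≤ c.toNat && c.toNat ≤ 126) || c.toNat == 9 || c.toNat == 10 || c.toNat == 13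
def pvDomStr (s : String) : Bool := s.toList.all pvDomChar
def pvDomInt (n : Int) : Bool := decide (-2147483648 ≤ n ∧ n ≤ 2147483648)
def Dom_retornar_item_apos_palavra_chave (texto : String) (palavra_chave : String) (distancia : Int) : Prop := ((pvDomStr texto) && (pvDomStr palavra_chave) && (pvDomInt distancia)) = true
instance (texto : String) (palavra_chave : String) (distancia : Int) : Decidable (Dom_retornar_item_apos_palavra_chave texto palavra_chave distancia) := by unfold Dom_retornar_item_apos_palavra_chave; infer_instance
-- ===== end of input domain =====

-- B precomputes a boolean keyword mask, shifts it forward by `distancia` with False padding,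
-- and selects the lines marked by the shifted mask — staged passes instead of A's single
-- indexed scan; same cost (alternative).

-- ===== PORT A =====
-- literal port of A: enumerate the lines, on a keyword hit append linhas[i + distancia];
-- the index access is guarded by the bounds test, so pyGetD with any default is exact here
def retornar_item_apos_palavra_chave (texto : String) (palavra_chave : String) (distancia : Int) : List String :=
  let linhas := (PySem.Str.split? (PySem.Str.strip texto) "\n").getD []
  (PySem.List.enumerate linhas).foldl
    (fun itens p =>
      if PySem.Str.isIn palavra_chave p.2 then
        if 0 ≤ p.1 + distancia ∧ p.1 + distancia < (linhas.length : Int) then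
          itens ++ [PySem.List.pyGetD linhas (p.1 + distancia) ""]
        else itens
      else itens) []

-- ===== PORT B =====
-- literal port of Source B: mask of keyword lines, shift it by distancia with False padding
-- (slices and [False]*k as in Source B), then filter the zip of lines with the shifted mask
def retornar_item_apos_palavra_chave_alt (texto : String) (palavra_chave : String) (distancia : Int) : List String :=
  let linhas := (PySem.Str.split? (PySem.Str.strip texto) "\n").getD []
  let n : Int := (linhas.length : Int)
  let mask := linhas.map (fun linha => PySem.Str.isIn palavra_chave linha)
  let shifted :=
    if 0 ≤ distancia then
      List.replicate (min distancia n).toNat false ++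
        PySem.List.slice mask none (some (max (n - distancia) 0))
    else
      PySem.List.slice mask (some (min (-distancia) n)) none ++
        List.replicate (min (-distancia) n).toNat false
  (linhas.zip shifted).foldl (fun itens p => if p.2 then itens ++ [p.1] else itens) []

-- ===== PRECONDITION & SPEC =====
def Spec_retornar_item_apos_palavra_chave (texto : String) (palavra_chave : String) (distancia : Int) (out : List String) : Prop := out = retornar_item_apos_palavra_chave_alt texto palavra_chave distancia
instance (texto : String) (palavra_chave : String) (distancia : Int) (out : List String) : Decidable (Spec_retornar_item_apos_palavra_chave texto palavra_chave distancia out) := by unfold Spec_retornar_item_apos_palavra_chave; infer_instance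

-- ===== CLAIM (what is proved, stated in full; the proofs are below) =====
def Claim_equal_retornar_item_apos_palavra_chave : Prop := ∀ (texto : String) (palavra_chave : String) (distancia : Int), Dom_retornar_item_apos_palavra_chave texto palavra_chave distancia → Spec_retornar_item_apos_palavra_chave texto palavra_chave distancia (retornar_item_apos_palavra_chave texto palavra_chave distancia)

-- ===== LEMMAS AND PROOFS =====

-- flatMap respects pointwise agreement on members
theorem pv_flatMap_congr {α β : Type} {l : List α} {f g : α → List β}
    (h : ∀ x ∈ l, f x = g x) : l.flatMap f = l.flatMap g := by
  induction l with
  | nil => rfl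
  | cons a t ih =>
    simp only [List.flatMap_cons]
    rw [h a (by simp), ih (fun x hx => h x (List.mem_cons_of_mem _ hx))]

-- flatMap of a function that vanishes on every member is []
theorem pv_flatMap_nil {α β : Type} {l : List α} {h : α → List β}
    (hv : ∀ j ∈ l, h j = []) : l.flatMap h = [] :=
  List.flatMap_eq_nil_iff.mpr hv

-- the common kernel: "output line j, whose source line j - d exists and contains pc"
def pvH (l : List String) (pc : String) (d : Int) (j : Int) : List String :=
  if (0 ≤ j ∧ j < (l.length : Int)) ∧ (0 ≤ j - d ∧ j - d < (l.length : Int)) ∧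
      PySem.Str.isIn pc (PySem.List.pyGetD l (j - d) "") = true then
    [PySem.List.pyGetD l j ""]
  else []

-- B's shifted-mask test at output index j, as a Bool
def pvB (l : List String) (pc : String) (d : Int) (j : Int) : Bool :=
  decide (0 ≤ j - d ∧ j - d < (l.length : Int)) &&
    PySem.Str.isIn pc (PySem.List.pyGetD l (j - d) "")

-- the shifted mask Source B builds (zeta-reduced body of the port's `shifted`)
def pvShift (l : List String) (pc : String) (d : Int) : List Bool :=
  if 0 ≤ d then
    List.replicate (min d (l.length : Int)).toNat false ++
      PySem.List.slice (l.map (fun linha => PySem.Str.isIn pc linha)) none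
        (some (max ((l.length : Int) - d) 0))
  else
    PySem.List.slice (l.map (fun linha => PySem.Str.isIn pc linha)) (some (min (-d) (l.length : Int))) none ++
      List.replicate (min (-d) (l.length : Int)).toNat false

-- a flatMap over [lo, hi) shrinks to [a, b) when h vanishes outside [a, b)
theorem pv_flatMap_trim {β : Type} (h : Int → List β) (lo a b hi : Int)
    (h1 : lo ≤ a) (h2 : a ≤ b) (h3 : b ≤ hi)
    (hz : ∀ j : Int, j < a ∨ b ≤ j → h j = []) :
    (PySem.List.pyRange lo hi).flatMap h = (PySem.List.pyRange a b).flatMap h := by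
  rw [PySem.List.pyRange_one_append lo a hi h1 (le_trans h2 h3),
      PySem.List.pyRange_one_append a b hi h2 h3,
      List.flatMap_append, List.flatMap_append]
  rw [pv_flatMap_nil (fun j hj => hz j (Or.inl (PySem.List.mem_pyRange_one.mp hj).2)),
      pv_flatMap_nil (fun j hj => hz j (Or.inr (PySem.List.mem_pyRange_one.mp hj).1))]
  simp

theorem pvH_zero_lt {l : List String} {pc : String} {d j : Int}
    (hj : j < 0 ∨ (l.length : Int) ≤ j) : pvH l pc d j = [] := by
  unfold pvH
  rw [if_neg]
  rintro ⟨⟨hj1, hj2⟩, -, -⟩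
  omega

theorem pvH_shift_lt {l : List String} {pc : String} {d j : Int}
    (hj : j < d ∨ (l.length : Int) + d ≤ j) : pvH l pc d j = [] := by
  unfold pvH
  rw [if_neg]
  rintro ⟨-, ⟨hj1, hj2⟩, -⟩
  omega

-- A's loop equals the flatMap of the kernel over the output index range
theorem pv_A (l : List String) (pc : String) (d : Int) :
    ((PySem.List.enumerate l).foldl
      (fun itens p =>
        if PySem.Str.isIn pc p.2 then
          if 0 ≤ p.1 + d ∧ p.1 + d < (l.length : Int) then
            itens ++ [PySem.List.pyGetD l (p.1 + d) ""]
          else itens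
        else itens) [])
    = (PySem.List.pyRange 0 (l.length : Int)).flatMap (pvH l pc d) := by
  have hn0 : (0 : Int) ≤ (l.length : Int) := by positivity
  rw [PySem.List.foldl_congr_mem _ _
        (fun itens (p : Int × String) => itens ++
          (if PySem.Str.isIn pc p.2 = true ∧ 0 ≤ p.1 + d ∧ p.1 + d < (l.length : Int)
           then [PySem.List.pyGetD l (p.1 + d) ""] else [])) []
        (by
          intro acc p _
          dsimp only
          by_cases h1 : PySem.Str.isIn pc p.2 = true
          · by_cases h2 : 0 ≤ p.1 + d ∧ p.1 + d < (l.length : Int)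
            · rw [if_pos h1, if_pos h2, if_pos ⟨h1, h2⟩]
            · rw [if_pos h1, if_neg h2, if_neg (fun hc => h2 hc.2), List.append_nil]
          · rw [if_neg h1, if_neg (fun hc => h1 hc.1), List.append_nil]),
      PySem.List.foldl_append_eq_flatMap]
  simp only [List.nil_append]
  rw [PySem.List.enumerate_eq_map_pyRange l "", List.flatMap_map]
  simp only [PySem.List.len_eq]
  have hAside : (PySem.List.pyRange 0 (l.length : Int)).flatMap
      (fun j => if PySem.Str.isIn pc (j, PySem.List.pyGetD l j "").2 = true ∧
                   0 ≤ (j, PySem.List.pyGetD l j "").1 + d ∧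
                   (j, PySem.List.pyGetD l j "").1 + d < (l.length : Int)
                then [PySem.List.pyGetD l ((j, PySem.List.pyGetD l j "").1 + d) ""] else [])
      = (PySem.List.pyRange 0 (l.length : Int)).flatMap (fun j => pvH l pc d (j + d)) := by
    apply pv_flatMap_congr
    intro j hj
    rw [PySem.List.mem_pyRange_one] at hj
    unfold pvH
    simp only [add_sub_cancel_right]
    by_cases h1 : PySem.Str.isIn pc (PySem.List.pyGetD l j "") = true ∧ 0 ≤ j + d ∧ j + d < (l.length : Int)
    · rw [if_pos h1, if_pos ⟨h1.2, hj, h1.1⟩]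
    · rw [if_neg h1, if_neg (by tauto)]
  rw [hAside]
  have hshift : (PySem.List.pyRange 0 (l.length : Int)).flatMap (fun j => pvH l pc d (j + d))
      = (PySem.List.pyRange d ((l.length : Int) + d)).flatMap (pvH l pc d) := by
    rw [PySem.List.pyRange_one 0 (l.length : Int), PySem.List.pyRange_one d ((l.length : Int) + d),
        List.flatMap_map, List.flatMap_map]
    have he : ((l.length : Int) + d - d).toNat = ((l.length : Int) - 0).toNat := by norm_num
    rw [he]
    exact pv_flatMap_congr (fun k _ => by congr 1; ring)
  rw [hshift]
  rw [← pv_flatMap_trim (pvH l pc d) (min 0 d) d ((l.length : Int) + d)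
        (max (l.length : Int) ((l.length : Int) + d))
        (min_le_right 0 d) (by omega) (le_max_right _ _)
        (fun j hj => pvH_shift_lt hj),
      pv_flatMap_trim (pvH l pc d) (min 0 d) 0 (l.length : Int)
        (max (l.length : Int) ((l.length : Int) + d))
        (min_le_left 0 d) hn0 (le_max_left _ _)
        (fun j hj => pvH_zero_lt hj)]

-- the shifted mask has one slot per line
theorem pvShift_length (l : List String) (pc : String) (d : Int) :
    (pvShift l pc d).length = l.length := by
  unfold pvShift
  split_ifs with hd
  · rw [PySem.List.slice_to _ (by omega)]
    simp only [List.length_append, List.length_replicate, List.length_take, List.length_map]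
    omega
  · rw [PySem.List.slice_from _ (by omega)]
    simp only [List.length_append, List.length_replicate, List.length_drop, List.length_map]
    omega

-- the shifted mask at slot k is exactly B's test pvB
theorem pvShift_getElem? (l : List String) (pc : String) (d : Int) (k : Nat)
    (hkl : k < l.length) :
    (pvShift l pc d)[k]? = some (pvB l pc d (k : Int)) := by
  unfold pvShift pvB
  split_ifs with hd
  · rw [PySem.List.slice_to _ (by omega)]
    by_cases hka : k < (min d (l.length : Int)).toNat
    · rw [List.getElem?_append_left (by simpa using hka), List.getElem?_replicate,
          if_pos hka,
          decide_eq_false (by omega : ¬(0 ≤ (k : Int) - d ∧ (k : Int) - d < (l.length : Int))),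
          Bool.false_and]
    · rw [List.getElem?_append_right
            (l₁ := List.replicate (min d (l.length : Int)).toNat false) (i := k)
            (by simp only [List.length_replicate]; omega)]
      simp only [List.length_replicate]
      rw [List.getElem?_take,
          if_pos (show k - (min d (l.length : Int)).toNat < (max ((l.length : Int) - d) 0).toNat
            by omega),
          List.getElem?_map,
          List.getElem?_eq_getElem (l := l) (i := k - (min d (l.length : Int)).toNat)
            (by omega)]
      have hcast : (k : Int) - d = ((k - (min d (l.length : Int)).toNat : Nat) : Int) := by omega
      rw [decide_eq_true (by omega : (0 ≤ (k : Int) - d ∧ (k : Int) - d < (l.length : Int))),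
          Bool.true_and, hcast, PySem.List.pyGetD_natCast,
          List.getD_eq_getElem _ _ (by omega)]
      simp only [Option.map_some]
  · rw [PySem.List.slice_from _ (by omega)]
    by_cases hka : k < l.length - (min (-d) (l.length : Int)).toNat
    · rw [List.getElem?_append_left
            (l₁ := List.drop (min (-d) (l.length : Int)).toNat
              (l.map (fun linha => PySem.Str.isIn pc linha))) (i := k)
            (by simp only [List.length_drop, List.length_map]; omega),
          List.getElem?_drop, List.getElem?_map,
          List.getElem?_eq_getElem (l := l)
            (i := (min (-d) (l.length : Int)).toNat + k) (by omega)]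
      have hcast : (k : Int) - d = (((min (-d) (l.length : Int)).toNat + k : Nat) : Int) := by omega
      rw [decide_eq_true (by omega : (0 ≤ (k : Int) - d ∧ (k : Int) - d < (l.length : Int))),
          Bool.true_and, hcast, PySem.List.pyGetD_natCast,
          List.getD_eq_getElem _ _ (by omega)]
      simp only [Option.map_some]
    · rw [List.getElem?_append_right
            (l₁ := List.drop (min (-d) (l.length : Int)).toNat
              (l.map (fun linha => PySem.Str.isIn pc linha))) (i := k)
            (by simp only [List.length_drop, List.length_map]; omega)]
      simp only [List.length_drop, List.length_map]
      rw [List.getElem?_replicate,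
          if_pos (show k - (l.length - (min (-d) (l.length : Int)).toNat)
              < (min (-d) (l.length : Int)).toNat by omega),
          decide_eq_false (by omega : ¬(0 ≤ (k : Int) - d ∧ (k : Int) - d < (l.length : Int))),
          Bool.false_and]

-- zipping a list with an equally long companion is a map over the index range
theorem pv_zip_eq_map {α β : Type} (l : List α) (s : List β) (da : α) (db : β)
    (hs : s.length = l.length) :
    l.zip s = (PySem.List.pyRange 0 (l.length : Int)).map
      (fun j => (PySem.List.pyGetD l j da, PySem.List.pyGetD s j db)) := by
  apply List.ext_getElem
  · simp [PySem.List.length_pyRange_one, hs]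
  · intro k h1 h2
    rw [List.getElem_zip, List.getElem_map, PySem.List.getElem_pyRange_one]
    have h0 : (0 : Int) + (k : Int) = ((k : Nat) : Int) := by omega
    rw [h0, PySem.List.pyGetD_natCast, PySem.List.pyGetD_natCast,
        List.getD_eq_getElem _ _ (by simp at h1; omega),
        List.getD_eq_getElem _ _ (by simp at h1; omega)]

-- the kernel in B's form, on in-range indices
theorem pvH_eq_pvB (l : List String) (pc : String) (d : Int) (j : Int)
    (h0 : 0 ≤ j) (h1 : j < (l.length : Int)) :
    (if pvB l pc d j then [PySem.List.pyGetD l j ""] else []) = pvH l pc d j := by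
  unfold pvH pvB
  by_cases h : (0 ≤ j - d ∧ j - d < (l.length : Int)) ∧
      PySem.Str.isIn pc (PySem.List.pyGetD l (j - d) "") = true
  · rw [if_pos (by rw [Bool.and_eq_true]; exact ⟨decide_eq_true h.1, h.2⟩), if_pos ⟨⟨h0, h1⟩, h.1, h.2⟩]
  · rw [if_neg (by simp only [Bool.and_eq_true, decide_eq_true_eq]; tauto),
        if_neg (by tauto)]

-- B's staged passes equal the flatMap of the kernel over the output index range
theorem pv_B (l : List String) (pc : String) (d : Int) :
    ((l.zip (pvShift l pc d)).foldl (fun itens p => if p.2 then itens ++ [p.1] else itens) [])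
    = (PySem.List.pyRange 0 (l.length : Int)).flatMap (pvH l pc d) := by
  rw [PySem.List.foldl_congr_mem _ _
        (fun itens (p : String × Bool) => itens ++ (if p.2 = true then [p.1] else [])) []
        (by
          intro acc p _
          dsimp only
          by_cases h : p.2 = true
          · rw [if_pos h, if_pos h]
          · rw [if_neg h, if_neg h, List.append_nil]),
      PySem.List.foldl_append_eq_flatMap]
  simp only [List.nil_append]
  rw [pv_zip_eq_map l (pvShift l pc d) "" false (pvShift_length l pc d), List.flatMap_map]
  apply pv_flatMap_congr
  intro j hj
  rw [PySem.List.mem_pyRange_one] at hj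
  have hsk : PySem.List.pyGetD (pvShift l pc d) j false = pvB l pc d j := by
    have hj' : j = ((j.toNat : Nat) : Int) := by omega
    rw [hj', PySem.List.pyGetD_natCast, List.getD_eq_getElem?_getD,
        pvShift_getElem? l pc d j.toNat (by omega), Option.getD_some]
  dsimp only
  rw [hsk]
  exact pvH_eq_pvB l pc d j hj.1 hj.2

-- ===== VERDICT (by name: the statement is the Claim_ definition above) =====
theorem retornar_item_apos_palavra_chave_spec : Claim_equal_retornar_item_apos_palavra_chave := by
  intro texto palavra_chave distancia _
  unfold Spec_retornar_item_apos_palavra_chave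
  unfold retornar_item_apos_palavra_chave retornar_item_apos_palavra_chave_alt
  exact (pv_A _ _ _).trans (pv_B _ _ _).symm
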